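-- pv_equiv track=rewrite | github.com/leonardopicchiami/nusmv_grid_game_controller_synthesis | src/python/utils/utils.py | cell_neighborhood
-- ===== SOURCE A (Python) =====
-- def cell_neighborhood(N, M, controlled_states, state):
--     '''
--     This function that calculates the neighborhood of a cell in the grid according to the controlled states,
--     i.e. the states that have at least one path up to the goal cell. This function indicates the possible cells
--     reachable from the current cell, or alternatively the set of successor states reachable from the current state.
--
--     Parameters
--     ----------
--     N : int
--        Number of grid rows.
--
--     M : int
--        Number of grid columns.
--
--     controlled_states : list
--        List of coordinates, i.e. cells, where there is a path from each cell to the goal.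
--
--     state : tuple
--        The cell (state) whose neighborhood is calculated.
--
--
--     Returns
--     -------
--     neighborhood : list
--         List of cells in the neighborhood of the input cell that have at least one path to the goal.
--     '''
--
--     neighborhood = []
--     for i in range(state[0] - 1, state[0] + 2):
--         for j in range(state[1] - 1, state[1] + 2):
--             if i == state[0] and j == state[1]:
--                 continue
--
--             if (i < 0 or i > N) or (j < 0 or j > M):
--                 continue
--
--             if (i, j) in controlled_states:
--                 neighborhood.append((i, j))
--
--     return neighborhood
-- ===== SOURCE B (Python) =====
-- def cell_neighborhood(N, M, controlled_states, state):
--     s0, s1 = state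
--     survivors = {(i, j) for (i, j) in controlled_states
--                  if abs(i - s0) <= 1 and abs(j - s1) <= 1 and (i, j) != state
--                  and 0 <= i <= N and 0 <= j <= M}
--     return sorted(survivors)
-- ===== Notes on version B (the rewrite author's own statement) =====
-- stated objective: alternative
-- what changed: Instead of probing the 8 fixed neighbor cells and testing each for membership in controlled_states (an O(|cs|) scan per probe), B makes one pass over controlled_states keeping cells adjacent to state and in bounds, dedupes them with a set, and returns them sorted (lexicographic order equals A's row-major scan order).
import Mathlib
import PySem

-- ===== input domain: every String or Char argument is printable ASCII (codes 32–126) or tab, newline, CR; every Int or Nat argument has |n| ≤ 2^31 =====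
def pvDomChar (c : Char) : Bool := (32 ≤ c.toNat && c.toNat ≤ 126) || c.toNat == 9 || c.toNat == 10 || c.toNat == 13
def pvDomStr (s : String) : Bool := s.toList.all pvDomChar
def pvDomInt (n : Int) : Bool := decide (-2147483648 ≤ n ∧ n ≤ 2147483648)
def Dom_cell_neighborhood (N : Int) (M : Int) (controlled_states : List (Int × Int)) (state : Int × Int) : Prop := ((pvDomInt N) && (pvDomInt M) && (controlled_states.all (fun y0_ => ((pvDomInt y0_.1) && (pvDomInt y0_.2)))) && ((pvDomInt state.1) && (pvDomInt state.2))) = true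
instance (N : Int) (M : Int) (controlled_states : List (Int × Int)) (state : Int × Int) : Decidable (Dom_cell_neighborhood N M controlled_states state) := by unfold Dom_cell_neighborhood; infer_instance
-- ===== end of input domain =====

-- B replaces A's 3×3 neighborhood probing (membership scan per probe) by one filtering pass
-- over controlled_states plus a set-dedup and a sort (alternative algorithm, same result).


-- ===== PORT A =====
def cell_neighborhood (N : Int) (M : Int) (controlled_states : List (Int × Int)) (state : Int × Int) : List (Int × Int) :=
  (PySem.List.pyRange (state.1 - 1) (state.1 + 2) 1).foldl (fun neighborhood i =>
    (PySem.List.pyRange (state.2 - 1) (state.2 + 2) 1).foldl (fun neighborhood j =>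
      if i = state.1 ∧ j = state.2 then neighborhood
      else if (i < 0 ∨ i > N) ∨ (j < 0 ∨ j > M) then neighborhood
      else if (i, j) ∈ controlled_states then neighborhood ++ [(i, j)]
      else neighborhood) neighborhood) []

-- ===== PORT B =====
def cell_neighborhood_alt (N : Int) (M : Int) (controlled_states : List (Int × Int)) (state : Int × Int) : List (Int × Int) :=
  PySem.List.sorted2
    (PySem.Set.ofList (controlled_states.filter (fun c =>
      decide ((c.1 - state.1).natAbs ≤ 1 ∧ (c.2 - state.2).natAbs ≤ 1 ∧ c ≠ state ∧
              0 ≤ c.1 ∧ c.1 ≤ N ∧ 0 ≤ c.2 ∧ c.2 ≤ M))))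
    (fun c => c.1) (fun c => c.2)

-- ===== PRECONDITION & SPEC =====
def Spec_cell_neighborhood (N : Int) (M : Int) (controlled_states : List (Int × Int)) (state : Int × Int) (out : List (Int × Int)) : Prop := out = cell_neighborhood_alt N M controlled_states state
instance (N : Int) (M : Int) (controlled_states : List (Int × Int)) (state : Int × Int) (out : List (Int × Int)) : Decidable (Spec_cell_neighborhood N M controlled_states state out) := by unfold Spec_cell_neighborhood; infer_instance

-- ===== CLAIM (what is proved, stated in full; the proofs are below) =====
def Claim_equal_cell_neighborhood : Prop := ∀ (N : Int) (M : Int) (controlled_states : List (Int × Int)) (state : Int × Int), Dom_cell_neighborhood N M controlled_states state → Spec_cell_neighborhood N M controlled_states state (cell_neighborhood N M controlled_states state)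

-- ===== LEMMAS AND PROOFS =====

-- range(a-1, a+2) is the three-element list [a-1, a, a+1]
theorem pv_range3 (a : Int) : PySem.List.pyRange (a - 1) (a + 2) 1 = [a - 1, a, a + 1] := by
  rw [PySem.List.pyRange_one_cons (by omega)]
  rw [show a - 1 + 1 = a by ring, PySem.List.pyRange_one_cons (by omega)]
  rw [PySem.List.pyRange_one_cons (by omega)]
  rw [PySem.List.pyRange_one_eq_nil (by omega)]

-- the single boolean condition A's three nested ifs test, for row i and column j
def pvKeep (N M : Int) (cs : List (Int × Int)) (s : Int × Int) (i j : Int) : Bool :=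
  decide (¬(i = s.1 ∧ j = s.2) ∧ ¬((i < 0 ∨ i > N) ∨ (j < 0 ∨ j > M)) ∧ (i, j) ∈ cs)

-- one row of A's scan, as a filter-then-map over the three column indices
def pvRow (N M : Int) (cs : List (Int × Int)) (s : Int × Int) (i : Int) : List (Int × Int) :=
  (([s.2 - 1, s.2, s.2 + 1] : List Int).filter (pvKeep N M cs s i)).map (fun j => (i, j))

-- A's inner loop body is a single conditional append
theorem pv_step_eq (N M : Int) (cs : List (Int × Int)) (s : Int × Int) (i : Int) :
    (fun (neighborhood : List (Int × Int)) (j : Int) =>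
      if i = s.1 ∧ j = s.2 then neighborhood
      else if (i < 0 ∨ i > N) ∨ (j < 0 ∨ j > M) then neighborhood
      else if (i, j) ∈ cs then neighborhood ++ [(i, j)]
      else neighborhood)
    = (fun acc j => if pvKeep N M cs s i j then acc ++ [(i, j)] else acc) := by
  funext acc j
  simp only [pvKeep, decide_eq_true_eq]
  split_ifs <;> tauto

-- A's value, named: the three rows concatenated
theorem pv_A_eq (N M : Int) (cs : List (Int × Int)) (s : Int × Int) :
    cell_neighborhood N M cs s =
      pvRow N M cs s (s.1 - 1) ++ pvRow N M cs s s.1 ++ pvRow N M cs s (s.1 + 1) := by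
  unfold cell_neighborhood
  rw [pv_range3 s.1, pv_range3 s.2]
  have houter : (fun (neighborhood : List (Int × Int)) (i : Int) =>
      ([s.2 - 1, s.2, s.2 + 1] : List Int).foldl (fun neighborhood j =>
        if i = s.1 ∧ j = s.2 then neighborhood
        else if (i < 0 ∨ i > N) ∨ (j < 0 ∨ j > M) then neighborhood
        else if (i, j) ∈ cs then neighborhood ++ [(i, j)]
        else neighborhood) neighborhood)
      = (fun acc i => acc ++ pvRow N M cs s i) := by
    funext acc i
    rw [pv_step_eq N M cs s i, PySem.List.foldl_append_if (pvKeep N M cs s i) (fun j => (i, j))]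
    rfl
  rw [houter, PySem.List.foldl_append_eq_flatMap (pvRow N M cs s) [s.1 - 1, s.1, s.1 + 1] []]
  simp [List.flatMap_cons, List.append_assoc]

-- lexicographic strict order on cells
def pvLt (a b : Int × Int) : Prop := a.1 < b.1 ∨ (a.1 = b.1 ∧ a.2 < b.2)

theorem pv_row_pairwise (N M : Int) (cs : List (Int × Int)) (s : Int × Int) (i : Int) :
    (pvRow N M cs s i).Pairwise pvLt := by
  unfold pvRow
  rw [List.pairwise_map]
  apply List.Pairwise.filter
  simp only [pvLt, List.pairwise_cons, List.mem_cons, List.not_mem_nil, or_false, true_and]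
  refine ⟨?_, ?_, fun a' h => h.elim, List.Pairwise.nil⟩ <;>
    (intro b hb; rcases hb with rfl | rfl | rfl <;> omega)

theorem pv_mem_row (N M : Int) (cs : List (Int × Int)) (s : Int × Int) (i : Int) (x : Int × Int) :
    x ∈ pvRow N M cs s i ↔
      x.1 = i ∧ (x.2 = s.2 - 1 ∨ x.2 = s.2 ∨ x.2 = s.2 + 1) ∧
      ¬(x.1 = s.1 ∧ x.2 = s.2) ∧ 0 ≤ x.1 ∧ x.1 ≤ N ∧ 0 ≤ x.2 ∧ x.2 ≤ M ∧ x ∈ cs := by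
  obtain ⟨x1, x2⟩ := x
  unfold pvRow pvKeep
  simp only [List.mem_map, List.mem_filter, List.mem_cons, List.not_mem_nil, or_false,
    decide_eq_true_eq, Prod.mk.injEq]
  constructor
  · rintro ⟨j, ⟨hj, h1, h2, h3⟩, rfl, rfl⟩
    exact ⟨rfl, hj, h1, by omega, by omega, by omega, by omega, h3⟩
  · rintro ⟨rfl, h2, h3, h4, h5, h6, h7, h8⟩
    exact ⟨x2, ⟨h2, h3, by omega, h8⟩, rfl, rfl⟩

-- A's value is strictly lexicographically increasing …
theorem pv_A_pairwise (N M : Int) (cs : List (Int × Int)) (s : Int × Int) :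
    (pvRow N M cs s (s.1 - 1) ++ pvRow N M cs s s.1 ++ pvRow N M cs s (s.1 + 1)).Pairwise pvLt := by
  simp only [List.pairwise_append]
  refine ⟨⟨pv_row_pairwise .., pv_row_pairwise .., ?_⟩, pv_row_pairwise .., ?_⟩
  · intro a ha b hb
    rw [pv_mem_row] at ha hb
    exact Or.inl (by omega)
  · intro a ha b hb
    rw [List.mem_append, pv_mem_row, pv_mem_row] at ha
    rw [pv_mem_row] at hb
    rcases ha with ha | ha <;> exact Or.inl (by omega)

-- … hence has no duplicates
theorem pv_A_nodup (N M : Int) (cs : List (Int × Int)) (s : Int × Int) :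
    (pvRow N M cs s (s.1 - 1) ++ pvRow N M cs s s.1 ++ pvRow N M cs s (s.1 + 1)).Nodup := by
  apply (pv_A_pairwise N M cs s).imp
  intro a b h he
  rw [he] at h
  unfold pvLt at h
  omega

-- … and holds exactly the cells B's filter keeps
theorem pv_A_mem (N M : Int) (cs : List (Int × Int)) (s : Int × Int) (x : Int × Int) :
    (x ∈ pvRow N M cs s (s.1 - 1) ++ pvRow N M cs s s.1 ++ pvRow N M cs s (s.1 + 1)) ↔
      x ∈ cs.filter (fun c =>
        decide ((c.1 - s.1).natAbs ≤ 1 ∧ (c.2 - s.2).natAbs ≤ 1 ∧ c ≠ s ∧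
                0 ≤ c.1 ∧ c.1 ≤ N ∧ 0 ≤ c.2 ∧ c.2 ≤ M)) := by
  obtain ⟨x1, x2⟩ := x
  obtain ⟨s1, s2⟩ := s
  simp only [List.mem_append, pv_mem_row, List.mem_filter, decide_eq_true_eq, ne_eq,
    Prod.mk.injEq, not_and]
  constructor
  · rintro ((⟨h1, h2, h3, h4⟩ | ⟨h1, h2, h3, h4⟩) | ⟨h1, h2, h3, h4⟩) <;>
      exact ⟨h4.2.2.2.2, by omega, by omega, by tauto, by tauto⟩
  · rintro ⟨hm, h1, h2, h3, h4⟩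
    have hne : ¬(x1 = s1 ∧ x2 = s2) := fun ⟨ha, hb⟩ => h3 ha hb
    have hx : x1 = s1 - 1 ∨ x1 = s1 ∨ x1 = s1 + 1 := by omega
    rcases hx with h | h | h
    · exact Or.inl (Or.inl ⟨h, by omega, by tauto, by tauto⟩)
    · exact Or.inl (Or.inr ⟨h, by omega, by tauto, by tauto⟩)
    · exact Or.inr ⟨h, by omega, by tauto, by tauto⟩

-- sorted2 with two keys is Python's sorted with the lexicographic key
theorem pv_sorted2_eq_sorted_lex (xs : List (Int × Int)) :
    PySem.List.sorted2 xs (fun c => c.1) (fun c => c.2) =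
      PySem.List.sorted xs (fun c => toLex (c.1, c.2)) := by
  show xs.foldl (fun acc x => PySem.List.insertBy
      (fun a b => decide (a.1 < b.1) || !decide (b.1 < a.1) && decide (a.2 < b.2)) x acc) []
    = xs.foldl (fun acc x => PySem.List.insertBy
      (fun a b => decide (toLex (a.1, a.2) < toLex (b.1, b.2))) x acc) []
  have hbefore : (fun (a b : Int × Int) =>
        decide (a.1 < b.1) || !decide (b.1 < a.1) && decide (a.2 < b.2))
      = (fun (a b : Int × Int) => decide (toLex (a.1, a.2) < toLex (b.1, b.2))) := by
    funext a b
    rcases lt_trichotomy a.1 b.1 with h | h | h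
    · simp [Prod.Lex.toLex_lt_toLex, h]
    · simp [Prod.Lex.toLex_lt_toLex, h]
    · simp [Prod.Lex.toLex_lt_toLex, h, show ¬(a.1 < b.1) by omega,
        show ¬(a.1 = b.1) by omega]
  rw [hbefore]

theorem cell_neighborhood_eq (N M : Int) (cs : List (Int × Int)) (s : Int × Int) :
    cell_neighborhood N M cs s = cell_neighborhood_alt N M cs s := by
  rw [pv_A_eq]
  unfold cell_neighborhood_alt
  rw [pv_sorted2_eq_sorted_lex]
  refine (PySem.List.sorted_eq_of_perm_of_pairwise_lt _ _ _ ?_ ?_).symm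
  · rw [List.perm_ext_iff_of_nodup (pv_A_nodup N M cs s) (PySem.Set.nodup_ofList _)]
    intro x
    rw [PySem.Set.mem_ofList, pv_A_mem]
  · apply (pv_A_pairwise N M cs s).imp
    intro a b h
    rw [Prod.Lex.toLex_lt_toLex]
    exact h

-- ===== VERDICT (by name: the statement is the Claim_ definition above) =====
theorem cell_neighborhood_spec : Claim_equal_cell_neighborhood := by
  intro N M cs s _
  unfold Spec_cell_neighborhood
  exact cell_neighborhood_eq N M cs s
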